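-- pv_equiv track=rewrite | github.com/Mandarhp77/Cdac-Python | Extra Question/ppp.py | ReverseMyString
-- ===== SOURCE A (Python) =====
-- def ReverseMyString(a):
--     st=""
--     b=a[::-1]
--     c=""
--     vow = "aeiouAEIOU"
--     count=0
--
--     for char in range(0,len(b),2):
--         c=b[char].lower()
--         st=st+c
--         c=""
--     for char in vow:
--         if(char in b):
--             count = count+1
--
--     return st , count
-- ===== SOURCE B (Python) =====
-- def ReverseMyString(a):
--     # single back-to-front slice instead of reverse-then-take; one pass over a
--     # with a seen-set instead of ten membership scans (one per vowel)
--     st = a[::-2].lower()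
--     seen = set()
--     for ch in a:
--         if ch in "aeiouAEIOU":
--             seen.add(ch)
--     return st, len(seen)
-- ===== Notes on version B (the rewrite author's own statement) =====
-- stated objective: simpler
-- what changed: B builds the result with one back-to-front slice a[::-2].lower() instead of reversing then index-looping with step 2, and counts distinct vowels in a single pass over the input collecting a seen-set instead of scanning the string once per each of the ten vowel characters.
import Mathlib
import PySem

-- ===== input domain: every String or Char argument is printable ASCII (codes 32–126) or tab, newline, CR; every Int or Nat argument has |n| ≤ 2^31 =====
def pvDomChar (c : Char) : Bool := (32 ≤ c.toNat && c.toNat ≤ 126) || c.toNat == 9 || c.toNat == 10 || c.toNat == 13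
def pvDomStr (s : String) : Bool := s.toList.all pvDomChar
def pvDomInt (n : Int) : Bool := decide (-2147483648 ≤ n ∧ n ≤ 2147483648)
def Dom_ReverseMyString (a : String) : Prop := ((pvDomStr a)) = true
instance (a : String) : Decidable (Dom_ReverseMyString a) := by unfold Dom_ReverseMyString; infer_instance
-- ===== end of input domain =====

-- B replaces A's reverse-then-index-loop with a single back-to-front slice a[::-2].lower()
-- and counts distinct vowels in one pass over the input with a seen-set instead of one
-- membership scan per vowel; objective: simpler.

-- ===== PORT A =====
def ReverseMyString (a : String) : String × Int :=
  let b := (PySem.List.slice? a.toList none none (-1)).getD []            -- b = a[::-1]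
  let st := (PySem.List.pyRange 0 (b.length : Int) 2).foldl               -- for char in range(0, len(b), 2):
      (fun st ch => st ++ PySem.Chars.lower [PySem.List.pyGetD b ch ' ']) []  --   c = b[char].lower(); st = st + c
  let count := "aeiouAEIOU".toList.foldl                                  -- for char in vow:
      (fun cnt ch => if PySem.Chars.isIn [ch] b then cnt + 1 else cnt) (0 : Int)  -- if char in b: count += 1
  (String.ofList st, count)

-- ===== PORT B =====
def ReverseMyString_alt (a : String) : String × Int :=
  let st := PySem.Chars.lower ((PySem.List.slice? a.toList none none (-2)).getD [])  -- a[::-2].lower()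
  let seen := a.toList.foldl                                              -- for ch in a:
      (fun s ch => if PySem.Chars.isIn [ch] "aeiouAEIOU".toList then PySem.Set.add s ch else s)
      PySem.Set.empty                                                     --   if ch in "aeiouAEIOU": seen.add(ch)
  (String.ofList st, (seen.length : Int))                                 -- len(seen)

-- ===== PRECONDITION & SPEC =====
def Spec_ReverseMyString (a : String) (out : String × Int) : Prop := out = ReverseMyString_alt a
instance (a : String) (out : String × Int) : Decidable (Spec_ReverseMyString a out) := by unfold Spec_ReverseMyString; infer_instance

-- ===== CLAIM (what is proved, stated in full; the proofs are below) =====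
def Claim_equal_ReverseMyString : Prop := ∀ (a : String), Dom_ReverseMyString a → Spec_ReverseMyString a (ReverseMyString a)

-- ===== LEMMAS AND PROOFS =====

-- a filterMap over range whose function is everywhere `some` is a map
theorem fm_eq_map {α : Type} (m : Nat) (f : Nat → Option α) (g : Nat → α)
    (h : ∀ k, k < m → f k = some (g k)) :
    (List.range m).filterMap f = (List.range m).map g := by
  rw [List.filterMap_congr (g := fun k => some (g k))
      (by intro a ha; exact h a (List.mem_range.mp ha))]
  exact congrFun (List.filterMap_eq_map (f := g)) _

-- A's step-2 index loop over the reversed list builds exactly lower(l[::-2])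
theorem st_eq (l : List Char) :
    (PySem.List.pyRange 0 (l.reverse.length : Int) 2).foldl
      (fun st ch => st ++ PySem.Chars.lower [PySem.List.pyGetD l.reverse ch ' ']) []
    = PySem.Chars.lower ((PySem.List.slice? l none none (-2)).getD []) := by
  rw [PySem.List.foldl_append_eq_flatMap, PySem.List.pyRange_of_pos 0 _ (by norm_num)]
  simp only [PySem.List.slice?, PySem.List.sliceIndices, PySem.Chars.lower, List.flatMap_map]
  norm_num
  rcases Nat.eq_zero_or_pos l.length with h0 | hpos
  · simp [h0]
  · simp only [if_pos hpos]
    have hm : (((l.length : Int) + 2 - 1) / 2).toNat = (l.length + 1) / 2 := by omega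
    rw [hm]
    set n := l.length with hn
    set m := (n + 1) / 2 with hmdef
    have hfm := fm_eq_map m (fun x : Nat => l[((n : Int) - 1 + -(2 * x)).toNat]?)
        (fun k => l.getD (n - 1 - 2 * k) ' ') ?_
    · rw [hfm, List.map_map,
        show List.flatMap (fun a : Nat => [PySem.Chars.lowerChar (PySem.List.pyGetD l.reverse (2 * a) ' ')]) (List.range m)
           = List.map (fun a : Nat => PySem.Chars.lowerChar (PySem.List.pyGetD l.reverse (2 * a) ' ')) (List.range m) from List.map_eq_flatMap.symm]
      apply List.map_congr_left
      intro k hk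
      have hk' : k < m := List.mem_range.mp hk
      have h2 : 2 * k < n := by omega
      have ht : ((2 : Int) * k).toNat = 2 * k := by omega
      show PySem.Chars.lowerChar (PySem.List.pyGetD l.reverse (2 * k) ' ') = PySem.Chars.lowerChar (l.getD (n - 1 - 2 * k) ' ')
      rw [PySem.List.pyGetD_of_nonneg _ _ (by positivity), ht]
      congr 1
      rw [List.getD_eq_getElem _ _ (by simpa using h2), List.getD_eq_getElem _ _ (by omega),
        List.getElem_reverse]
    · intro k hk
      have h2 : 2 * k < n := by omega
      show l[((n : Int) - 1 + -(2 * k)).toNat]? = some (l.getD (n - 1 - 2 * k) ' ')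
      have hidx : ((n : Int) - 1 + -(2 * (k : Int))).toNat = n - 1 - 2 * k := by omega
      rw [hidx, List.getElem?_eq_getElem (by omega), List.getD_eq_getElem _ _ (by omega)]

-- A's per-vowel membership count equals the size of B's seen-set
theorem count_eq (l : List Char) :
    "aeiouAEIOU".toList.foldl
      (fun cnt ch => if PySem.Chars.isIn [ch] l.reverse then cnt + 1 else cnt) (0 : Int)
    = ((l.foldl (fun s ch => if PySem.Chars.isIn [ch] "aeiouAEIOU".toList then PySem.Set.add s ch else s)
        PySem.Set.empty).length : Int) := by
  rw [PySem.List.foldl_if_add_one, PySem.List.foldl_if_eq_foldl_filter]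
  rw [show (l.filter (fun ch => PySem.Chars.isIn [ch] "aeiouAEIOU".toList)).foldl PySem.Set.add PySem.Set.empty
      = PySem.Set.ofList (l.filter (fun ch => PySem.Chars.isIn [ch] "aeiouAEIOU".toList)) from
      (PySem.Set.ofList_eq_foldl _).symm]
  have hperm : ("aeiouAEIOU".toList.filter (fun ch => PySem.Chars.isIn [ch] l.reverse)).Perm
      (PySem.Set.ofList (l.filter (fun ch => PySem.Chars.isIn [ch] "aeiouAEIOU".toList))) := by
    rw [List.perm_ext_iff_of_nodup (List.Nodup.filter _ (by decide)) (PySem.Set.nodup_ofList _)]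
    intro x
    simp only [List.mem_filter, PySem.Set.mem_ofList, PySem.Chars.isIn_iff_infix,
      List.singleton_infix_iff, List.mem_reverse]
    tauto
  rw [List.countP_eq_length_filter, hperm.length_eq]
  simp

-- ===== VERDICT (by name: the statement is the Claim_ definition above) =====
theorem ReverseMyString_spec : Claim_equal_ReverseMyString := by
  intro a _
  unfold Spec_ReverseMyString ReverseMyString ReverseMyString_alt
  rw [PySem.List.slice?_none_none_neg_one]
  simp only [Option.getD_some]
  exact Prod.ext (congrArg String.ofList (st_eq a.toList)) (count_eq a.toList)
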